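-- pv_equiv track=rewrite | github.com/OZestina/TheGreatestGrace | codingTest/programmers/py/221031_햄버거.py | solution
-- ===== SOURCE A (Python) =====
-- def solution(ingredient):
--     answer = 0
--
--     making = []
--     last = -1
--     for i in ingredient:
--         if i == 1:
--             if last == 3:
--                 answer += 1
--                 if len(making) > 1: last = making.pop()
--                 else: last = -1
--             else:
--                 making.append(last)
--                 last = 1
--         elif i == 2:
--             if last == 1: last = 2
--             else:
--                 making = []
--                 last = -1
--         else:
--             if last == 2: last = 3
--             else:
--                 making = []
--                 last = -1
--
--     return answer
-- ===== SOURCE B (Python) =====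
-- def solution(ingredient):
--     stack = []
--     count = 0
--     for i in ingredient:
--         stack.append(i if i == 1 or i == 2 else 3)
--         if len(stack) >= 4 and stack[-4:] == [1, 2, 3, 1]:
--             del stack[-4:]
--             count += 1
--     return count
-- ===== Notes on version B (the rewrite author's own statement) =====
-- stated objective: idiomatic
-- what changed: B replaces A's collapsed progress register `last` plus suspended-state list `making` by the standard stack solution: push each ingredient (normalized to 3 for any non-bread/non-meat value) and, whenever the top four stack entries spell a complete burger, delete them and count it.
import Mathlib
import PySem

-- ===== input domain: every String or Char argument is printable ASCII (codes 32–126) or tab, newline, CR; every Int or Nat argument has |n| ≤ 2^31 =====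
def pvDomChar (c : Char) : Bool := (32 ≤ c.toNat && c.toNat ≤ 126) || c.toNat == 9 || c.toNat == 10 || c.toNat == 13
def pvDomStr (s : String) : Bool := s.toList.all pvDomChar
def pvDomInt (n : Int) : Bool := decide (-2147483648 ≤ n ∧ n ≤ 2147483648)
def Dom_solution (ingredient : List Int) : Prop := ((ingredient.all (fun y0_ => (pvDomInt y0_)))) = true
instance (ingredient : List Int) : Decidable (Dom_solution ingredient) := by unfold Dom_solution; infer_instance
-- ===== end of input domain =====

-- B replaces A's collapsed progress register/suspended-state list by the standard push-then-check
-- stack solution (idiomatic; same O(n) cost). Neither version mutates the argument.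

-- ===== PORT A =====
-- loop body of A: state (answer, making, last)
def pvStepA (st : Int × List Int × Int) (i : Int) : Int × List Int × Int :=
  let answer := st.1
  let making := st.2.1
  let last := st.2.2
  if i = 1 then
    if last = 3 then
      if 1 < making.length then
        match PySem.List.pop? making with  -- making.pop()
        | some (v, rest) => (answer + 1, rest, v)
        | none => (answer + 1, making, last)  -- unreachable: making has more than one element
      else (answer + 1, making, -1)
    else (answer, making ++ [last], 1)
  else if i = 2 then
    if last = 1 then (answer, making, 2)
    else (answer, [], -1)
  else
    if last = 2 then (answer, making, 3)
    else (answer, [], -1)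

def solution (ingredient : List Int) : Int :=
  (ingredient.foldl pvStepA (0, [], -1)).1

-- ===== PORT B =====
-- loop body of B: state (stack, count); push the normalized ingredient, then pop a complete burger
def pvStepB (st : List Int × Int) (i : Int) : List Int × Int :=
  let stack := st.1 ++ [if i = 1 ∨ i = 2 then i else 3]
  if 4 ≤ stack.length ∧ stack.drop (stack.length - 4) = [1, 2, 3, 1] then
    (stack.take (stack.length - 4), st.2 + 1)  -- del stack[-4:]
  else (stack, st.2)

def solution_alt (ingredient : List Int) : Int :=
  (ingredient.foldl pvStepB ([], 0)).2

-- ===== PRECONDITION & SPEC =====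
def Spec_solution (ingredient : List Int) (out : Int) : Prop := out = solution_alt ingredient
instance (ingredient : List Int) (out : Int) : Decidable (Spec_solution ingredient out) := by unfold Spec_solution; infer_instance

-- ===== CLAIM (what is proved, stated in full; the proofs are below) =====
def Claim_equal_solution : Prop := ∀ (ingredient : List Int), Dom_solution ingredient → Spec_solution ingredient (solution ingredient)

-- ===== LEMMAS AND PROOFS =====

-- encoding of A's `last` register as the stack segment it stands for
def pvEnc (l : Int) : List Int :=
  if l = 1 then [1] else if l = 2 then [1, 2] else if l = 3 then [1, 2, 3] else []

def pvFlat (r : List Int) : List Int := (r.map pvEnc).flatten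

-- the dead prefix of B's stack: nothing ending in 1, [1,2] or [1,2,3] (so no pop ever reaches it)
def pvJok (j : List Int) : Prop :=
  ¬ ([1] <:+ j) ∧ ¬ ([1, 2] <:+ j) ∧ ¬ ([1, 2, 3] <:+ j)

-- coupling invariant between A's state and B's state
def pvInv (a : Int × List Int × Int) (b : List Int × Int) : Prop :=
  ∃ j k r, a.2.1 = List.replicate k (-1) ++ r ∧
    (∀ x ∈ r, x = 1 ∨ x = 2) ∧
    b.1 = j ++ pvFlat r ++ pvEnc a.2.2 ∧
    (a.2.2 = -1 ∨ a.2.2 = 1 ∨ a.2.2 = 2 ∨ a.2.2 = 3) ∧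
    (a.2.2 ≠ -1 → 1 ≤ k) ∧
    (a.2.2 = -1 → r = []) ∧
    pvJok j ∧ b.2 = a.1

theorem pv_snoc_suffix_snoc (ys xs : List Int) (b a : Int) :
    (ys ++ [b]) <:+ (xs ++ [a]) ↔ b = a ∧ ys <:+ xs := by
  constructor
  · rintro ⟨t, ht⟩
    rw [← List.append_assoc] at ht
    obtain ⟨h1, h2⟩ := List.append_inj' ht (by simp)
    exact ⟨by simpa using h2, ⟨t, h1⟩⟩
  · rintro ⟨rfl, t, rfl⟩
    exact ⟨t, by simp⟩

theorem pv_match_iff (s : List Int) :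
    (4 ≤ s.length ∧ s.drop (s.length - 4) = [1, 2, 3, 1]) ↔ [1, 2, 3, 1] <:+ s := by
  constructor
  · rintro ⟨h1, h2⟩
    rw [List.suffix_iff_eq_drop]
    simpa using h2.symm
  · rintro ⟨t, rfl⟩
    refine ⟨by simp, ?_⟩
    have hl : (t ++ [1, 2, 3, 1]).length - 4 = t.length := by simp
    rw [hl, List.drop_left]

theorem pv_flat_append (r : List Int) (x : Int) :
    pvFlat (r ++ [x]) = pvFlat r ++ pvEnc x := by simp [pvFlat]


theorem pv_take_pop (t : List Int) :
    ((t ++ [1, 2, 3, 1]).take ((t ++ [1, 2, 3, 1]).length - 4)) = t := by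
  have h : (t ++ [1, 2, 3, 1]).length - 4 = t.length := by simp
  rw [h, List.take_left]

theorem pv_ne_last (ys xs : List Int) (b a : Int) (h : b ≠ a) :
    ¬ (ys ++ [b]) <:+ (xs ++ [a]) := by
  rw [pv_snoc_suffix_snoc]
  rintro ⟨h', -⟩
  exact h h'

theorem pv_single_ne (xs : List Int) (c a : Int) (h : c ≠ a) : ¬ [c] <:+ (xs ++ [a]) := by
  have := pv_ne_last [] xs c a h
  simpa using this

theorem pv_no_sfx (xs : List Int) (v : Int) (hv : v ≠ 1) : ¬ [1, 2, 3, 1] <:+ (xs ++ [v]) := by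
  have := pv_ne_last [1, 2, 3] xs 1 v (fun h => hv h.symm)
  simpa using this

theorem pv_no_sfx1 (xs : List Int) (h123 : ¬ [1, 2, 3] <:+ xs) :
    ¬ [1, 2, 3, 1] <:+ (xs ++ [1]) := by
  rw [show ([1, 2, 3, 1] : List Int) = [1, 2, 3] ++ [1] from rfl, pv_snoc_suffix_snoc]
  rintro ⟨-, h⟩
  exact h123 h

theorem pvStepB_push (stk : List Int) (cnt i v : Int)
    (hv : (if i = 1 ∨ i = 2 then i else 3) = v)
    (h : ¬ [1, 2, 3, 1] <:+ (stk ++ [v])) :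
    pvStepB (stk, cnt) i = (stk ++ [v], cnt) := by
  simp only [pvStepB, hv]
  rw [if_neg (fun hc => h ((pv_match_iff _).mp hc))]

theorem pvStepB_pop (stk t : List Int) (cnt i v : Int)
    (hv : (if i = 1 ∨ i = 2 then i else 3) = v)
    (ht : stk ++ [v] = t ++ [1, 2, 3, 1]) :
    pvStepB (stk, cnt) i = (t, cnt + 1) := by
  simp only [pvStepB, hv, ht]
  rw [if_pos ((pv_match_iff _).mpr ⟨t, rfl⟩), pv_take_pop]

theorem pvStep (a : Int × List Int × Int) (b : List Int × Int) (i : Int) (h : pvInv a b) :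
    pvInv (pvStepA a i) (pvStepB b i) := by
  obtain ⟨ans, mk, lst⟩ := a
  obtain ⟨stk, cnt⟩ := b
  obtain ⟨j, k, r, hm, hr, hs, hl, hk, hlr, hJ, hc⟩ := h
  simp only at hm hs hl hk hlr hc
  subst hc
  subst hs
  subst hm
  by_cases hi1 : i = 1
  · subst hi1
    by_cases h3 : lst = 3
    · subst h3
      -- completion: B pops a burger
      have hkk : 1 ≤ k := hk (by decide)
      have hBeq : pvStepB (j ++ pvFlat r ++ pvEnc 3, cnt) 1 = (j ++ pvFlat r, cnt + 1) :=
        pvStepB_pop (j ++ pvFlat r ++ pvEnc 3) (j ++ pvFlat r) cnt 1 1 (by decide)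
          (by simp [pvEnc])
      rw [hBeq]
      by_cases hlen : 1 < (List.replicate k (-1 : Int) ++ r).length
      · rcases List.eq_nil_or_concat r with rfl | ⟨r0, m, hr0⟩
        · -- r = []: making is all -1, k ≥ 2
          obtain ⟨k', rfl⟩ : ∃ k', k = k' + 1 := ⟨k - 1, by omega⟩
          have hXrep : List.replicate (k' + 1) (-1 : Int) ++ ([] : List Int)
              = List.replicate k' (-1 : Int) ++ [(-1 : Int)] := by
            rw [List.append_nil, List.replicate_succ']
          have hc1 : ¬ k' = 0 := by simp at hlen; omega
          have hAeq : pvStepA (cnt, List.replicate (k' + 1) (-1 : Int) ++ ([] : List Int), 3) 1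
              = (cnt + 1, List.replicate k' (-1 : Int), -1) := by
            simp [pvStepA, hXrep, PySem.List.pop?_last, hc1]
          rw [hAeq]
          exact ⟨j, k', [], by simp, by simp, by simp [pvFlat, pvEnc], by simp,
            fun h => absurd rfl h, fun _ => rfl, hJ, by simp⟩
        · -- r = r0 ++ [m]: pop resumes the suspended state m
          subst hr0
          have hm12 : m = 1 ∨ m = 2 := hr m (by simp)
          have hX : List.replicate k (-1 : Int) ++ (r0.concat m)
              = (List.replicate k (-1 : Int) ++ r0) ++ [m] := by simp
          have hpop : PySem.List.pop? (List.replicate k (-1 : Int) ++ (r0 ++ [m]))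
              = some (m, List.replicate k (-1 : Int) ++ r0) := by
            rw [← List.append_assoc]; exact PySem.List.pop?_last _ _
          have hcl : 1 < k + (r0.length + 1) := by omega
          have hAeq : pvStepA (cnt, List.replicate k (-1 : Int) ++ r0.concat m, 3) 1
              = (cnt + 1, List.replicate k (-1 : Int) ++ r0, m) := by
            simp [pvStepA, hpop, hcl]
          rw [hAeq]
          refine ⟨j, k, r0, rfl, fun x hx => hr x (by simp [hx]), ?_, ?_, fun _ => hkk, ?_, hJ, by simp⟩
          · simp [List.concat_eq_append, pv_flat_append]
          · rcases hm12 with rfl | rfl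
            · exact Or.inr (Or.inl rfl)
            · exact Or.inr (Or.inr (Or.inl rfl))
          · rintro rfl; rcases hm12 with h | h <;> exact absurd h (by decide)
      · -- making has length ≤ 1: k = 1, r = []
        have hlen' : k + r.length ≤ 1 := by simpa using hlen
        have hk1 : k = 1 := by omega
        have hre : r = [] := by
          have : r.length = 0 := by omega
          exact List.length_eq_zero_iff.mp this
        subst hre
        subst hk1
        have hAeq : pvStepA (cnt, List.replicate 1 (-1 : Int) ++ ([] : List Int), 3) 1
            = (cnt + 1, List.replicate 1 (-1 : Int) ++ ([] : List Int), -1) := by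
          simp [pvStepA]
        rw [hAeq]
        exact ⟨j, 1, [], by simp, by simp, by simp [pvFlat, pvEnc], by simp,
          fun h => absurd rfl h, fun _ => rfl, hJ, by simp⟩
    · -- i = 1 but no completion: append to making, last := 1
      have hno3 : ¬ [1, 2, 3] <:+ (j ++ pvFlat r ++ pvEnc lst) := by
        rcases hl with rfl | rfl | rfl | rfl
        · rw [hlr rfl]; simpa [pvFlat, pvEnc] using hJ.2.2
        · have := pv_ne_last [1, 2] (j ++ pvFlat r) 3 1 (by decide)
          simpa [pvEnc] using this
        · have := pv_ne_last [1, 2] (j ++ pvFlat r ++ [1]) 3 2 (by decide)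
          simpa [pvEnc] using this
        · exact absurd rfl h3
      have hBeq : pvStepB (j ++ pvFlat r ++ pvEnc lst, cnt) 1
          = ((j ++ pvFlat r ++ pvEnc lst) ++ [1], cnt) :=
        pvStepB_push (j ++ pvFlat r ++ pvEnc lst) cnt 1 1 (by decide) (pv_no_sfx1 _ hno3)
      rw [hBeq]
      have hAeq : pvStepA (cnt, List.replicate k (-1 : Int) ++ r, lst) 1
          = (cnt, List.replicate k (-1 : Int) ++ (r ++ [lst]), 1) := by
        simp [pvStepA, h3]
      rw [hAeq]
      rcases hl with rfl | rfl | rfl | rfl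
      · rw [hlr rfl]
        refine ⟨j, k + 1, [], ?_, by simp, by simp [pvFlat, pvEnc], by simp,
          fun _ => by omega, by simp, hJ, by simp⟩
        simp [List.replicate_succ']
      · refine ⟨j, k, r ++ [1], rfl, ?_, ?_, by simp,
          fun _ => hk (by decide), by simp, hJ, by simp⟩
        · intro x hx; rcases List.mem_append.mp hx with h | h
          · exact hr x h
          · simp at h; exact Or.inl h
        · simp [pv_flat_append, pvEnc]
      · refine ⟨j, k, r ++ [2], rfl, ?_, ?_, by simp,
          fun _ => hk (by decide), by simp, hJ, by simp⟩
        · intro x hx; rcases List.mem_append.mp hx with h | h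
          · exact hr x h
          · simp at h; exact Or.inr h
        · simp [pv_flat_append, pvEnc]
      · exact absurd rfl h3
  · by_cases hi2 : i = 2
    · subst hi2
      have hBeq : pvStepB (j ++ pvFlat r ++ pvEnc lst, cnt) 2
          = ((j ++ pvFlat r ++ pvEnc lst) ++ [2], cnt) :=
        pvStepB_push (j ++ pvFlat r ++ pvEnc lst) cnt 2 2 (by decide) (pv_no_sfx _ _ (by decide))
      rw [hBeq]
      by_cases hl1 : lst = 1
      · subst hl1
        simp only [pvStepA, if_neg (by decide : (2 : Int) ≠ 1)]
        exact ⟨j, k, r, rfl, hr, by simp [pvEnc], by simp, fun _ => hk (by decide),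
          by simp, hJ, rfl⟩
      · -- reset: the whole stack becomes dead
        simp only [pvStepA, if_neg (by decide : (2 : Int) ≠ 1), if_neg hl1]
        refine ⟨(j ++ pvFlat r ++ pvEnc lst) ++ [2], 0, [], by simp, by simp,
          by simp [pvFlat, pvEnc], by simp, by intro h; exact absurd rfl h, by simp,
          ⟨pv_single_ne _ _ _ (by decide), ?_, pv_ne_last [1, 2] _ 3 2 (by decide)⟩, rfl⟩
        rw [show ([1, 2] : List Int) = [1] ++ [2] from rfl, pv_snoc_suffix_snoc]
        rintro ⟨-, hS⟩
        rcases hl with rfl | rfl | rfl | rfl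
        · rw [hlr rfl] at hS; simp [pvFlat, pvEnc] at hS; exact hJ.1 hS
        · exact absurd rfl hl1
        · exact pv_single_ne (j ++ pvFlat r ++ [1]) 1 2 (by decide) (by simpa [pvEnc] using hS)
        · exact pv_single_ne (j ++ pvFlat r ++ [1, 2]) 1 3 (by decide) (by
            have : j ++ pvFlat r ++ pvEnc 3 = (j ++ pvFlat r ++ [1, 2]) ++ [3] := by
              simp [pvEnc]
            rwa [this] at hS)
    · -- else branch: normalized push of 3
      have hv : (if i = 1 ∨ i = 2 then i else 3) = 3 := by
        rw [if_neg]; rintro (h | h); exact hi1 h; exact hi2 h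
      have hBeq : pvStepB (j ++ pvFlat r ++ pvEnc lst, cnt) i
          = ((j ++ pvFlat r ++ pvEnc lst) ++ [3], cnt) :=
        pvStepB_push (j ++ pvFlat r ++ pvEnc lst) cnt i 3 hv (pv_no_sfx _ _ (by decide))
      rw [hBeq]
      by_cases hl2 : lst = 2
      · subst hl2
        simp only [pvStepA, if_neg hi1, if_neg hi2]
        exact ⟨j, k, r, rfl, hr, by simp [pvEnc], by simp, fun _ => hk (by decide),
          by simp, hJ, rfl⟩
      · simp only [pvStepA, if_neg hi1, if_neg hi2, if_neg hl2]
        refine ⟨(j ++ pvFlat r ++ pvEnc lst) ++ [3], 0, [], by simp, by simp,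
          by simp [pvFlat, pvEnc], by simp, by intro h; exact absurd rfl h, by simp,
          ⟨pv_single_ne _ _ _ (by decide), pv_ne_last [1] _ 2 3 (by decide), ?_⟩, rfl⟩
        rw [show ([1, 2, 3] : List Int) = [1, 2] ++ [3] from rfl, pv_snoc_suffix_snoc]
        rintro ⟨-, hS⟩
        rcases hl with rfl | rfl | rfl | rfl
        · rw [hlr rfl] at hS; simp [pvFlat, pvEnc] at hS; exact hJ.2.1 hS
        · exact pv_ne_last [1] (j ++ pvFlat r) 2 1 (by decide) (by simpa [pvEnc] using hS)
        · exact absurd rfl hl2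
        · exact pv_ne_last [1] (j ++ pvFlat r ++ [1, 2]) 2 3 (by decide) (by
            have : j ++ pvFlat r ++ pvEnc 3 = (j ++ pvFlat r ++ [1, 2]) ++ [3] := by
              simp [pvEnc]
            rwa [this] at hS)

theorem pv_fold (l : List Int) (a : Int × List Int × Int) (b : List Int × Int)
    (h : pvInv a b) : pvInv (l.foldl pvStepA a) (l.foldl pvStepB b) := by
  induction l generalizing a b with
  | nil => exact h
  | cons x xs ih => exact ih _ _ (pvStep _ _ _ h)

-- ===== VERDICT (by name: the statement is the Claim_ definition above) =====
theorem solution_spec : Claim_equal_solution := by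
  intro ingredient _
  have h0 : pvInv (0, [], -1) ([], 0) := by
    exact ⟨[], 0, [], by simp, by simp, by simp [pvFlat, pvEnc], by simp, by simp, by simp,
      ⟨by simp, by simp, by simp⟩, rfl⟩
  have h := pv_fold ingredient _ _ h0
  obtain ⟨-, -, -, -, -, -, -, -, -, -, hc⟩ := h
  unfold Spec_solution solution solution_alt
  exact hc.symm
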